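-- pv_equiv track=rewrite | github.com/EdwinRou/tipe_2021 | fonctions.py | decrypt_naif
-- ===== SOURCE A (Python) =====
-- k = 9 # taille du message envoyé choisi de sorte que l'on autorise 3 erreurs)
--
-- def sont_egale(L,M): # test l'égalité de deux listes
--     if len(M) != len(L):
--         return False
--     else:
--         for i in range(len(L)):
--              if L[i] != M[i]:
--                  return False
--     return True
--
-- def decrypt_naif(L):
--     n = len(L)
--     D = []
--     c = [1]*(3) # nombre d'éléments en commun entre les trois parties du message
--     for i in range(3):
--         D.append(L[k*i:k*(i+1)])# on découpe L en trois parties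
--     for i in range(len(D)-2):
--         for j in range(i+1, len(D)-1):
--             if j<len(D) and sont_egale(D[i],D[j]):# on les compares deux à deux
--                 D.pop(j)
--                 c[i]+=c.pop(j)
--     imax = c.index(max(c))
--     return D[imax]
-- ===== SOURCE B (Python) =====
-- def decrypt_naif(L):
--     # A's fixed loop bounds mean it only ever compares the first two chunks,
--     # and c.index(max(c)) is always 0, so the result is always the first chunk.
--     return L[:9]
-- ===== Notes on version B (the rewrite author's own statement) =====
-- stated objective: simpler
-- what changed: A's chunking, pairwise comparison with pops and an argmax over the vote counter always select the first chunk, so B replaces the whole machinery with the single slice L[:9].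
import Mathlib
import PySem

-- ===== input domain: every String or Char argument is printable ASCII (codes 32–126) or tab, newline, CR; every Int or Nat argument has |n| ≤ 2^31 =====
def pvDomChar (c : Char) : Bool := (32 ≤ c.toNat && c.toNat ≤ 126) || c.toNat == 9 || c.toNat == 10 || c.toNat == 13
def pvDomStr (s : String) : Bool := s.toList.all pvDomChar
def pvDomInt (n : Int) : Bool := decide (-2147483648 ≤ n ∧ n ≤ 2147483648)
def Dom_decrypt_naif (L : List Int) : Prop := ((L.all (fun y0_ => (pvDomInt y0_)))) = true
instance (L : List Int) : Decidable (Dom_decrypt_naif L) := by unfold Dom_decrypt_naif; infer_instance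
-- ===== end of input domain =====

-- B is a single slice L[:9]: A's fixed loop bounds compare only the first two chunks and
-- c.index(max(c)) is always 0, so A always returns the first chunk. Objective: simpler.

-- ===== PORT A =====
-- helper sont_egale(L, M): early-exit element-wise equality of two lists
def sont_egale (L M : List Int) : Bool :=
  if M.length ≠ L.length then false
  else (PySem.List.pyRange 0 (L.length : Int) 1).all
    (fun i => (PySem.List.pyGet? L i) == (PySem.List.pyGet? M i))

def decrypt_naif (L : List Int) : List Int :=
  let D0 : List (List Int) :=
    (PySem.List.pyRange 0 3 1).foldl
      (fun D i => D ++ [PySem.List.slice L (some (9 * i)) (some (9 * (i + 1)))]) []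
  let c0 : List Int := List.replicate 3 1
  let st :=
    (PySem.List.pyRange 0 ((D0.length : Int) - 2) 1).foldl
      (fun st i =>
        (PySem.List.pyRange (i + 1) ((st.1.length : Int) - 1) 1).foldl
          (fun st j =>
            if j < (st.1.length : Int) ∧
               sont_egale ((PySem.List.pyGet? st.1 i).getD []) ((PySem.List.pyGet? st.1 j).getD []) then
              -- D.pop(j); c[i] += c.pop(j)  (both pops succeed: 0 ≤ i < j < len)
              match PySem.List.pop? st.1 j, PySem.List.pop? st.2 j with
              | some (_, D'), some (cv, c') =>
                  (D', PySem.List.pySetD c' i ((PySem.List.pyGet? c' i).getD 0 + cv))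
              | _, _ => st
            else st) st)
      (D0, c0)
  let imax : Int := ((PySem.List.index? st.2 ((PySem.List.max? st.2 (fun x => x)).getD 0)).getD 0 : Nat)
  (PySem.List.pyGet? st.1 imax).getD []

-- ===== PORT B =====
def decrypt_naif_alt (L : List Int) : List Int := PySem.List.slice L none (some 9)

-- ===== PRECONDITION & SPEC =====
def Spec_decrypt_naif (L : List Int) (out : List Int) : Prop := out = decrypt_naif_alt L
instance (L : List Int) (out : List Int) : Decidable (Spec_decrypt_naif L out) := by unfold Spec_decrypt_naif; infer_instance

-- ===== CLAIM (what is proved, stated in full; the proofs are below) =====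
def Claim_equal_decrypt_naif : Prop := ∀ (L : List Int), Dom_decrypt_naif L → Spec_decrypt_naif L (decrypt_naif L)

-- ===== LEMMAS AND PROOFS =====

-- ===== VERDICT (by name: the statement is the Claim_ definition above) =====
theorem decrypt_naif_spec : Claim_equal_decrypt_naif := by
  intro L _
  unfold Spec_decrypt_naif decrypt_naif decrypt_naif_alt
  by_cases h : sont_egale (PySem.List.slice L none (some 9)) (PySem.List.slice L (some 9) (some 18)) = true <;>
    simp [PySem.List.pyRange_one, List.range_succ, h, PySem.List.pop?, PySem.List.pySetD,
      PySem.List.pySet?, PySem.List.max?, PySem.List.index?, List.idxOf?, List.findIdx?, List.findIdx?.go,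
      PySem.List.pyGet?, PySem.List.pyIdx?]
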